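-- pv_equiv track=rewrite | github.com/chiboreache/EpicCSV | app/models/panda.py | epic_give_away
-- ===== SOURCE A (Python) =====
-- NONE_SIGN = '✖️'
--
-- def epic_give_away(df, df2, fn):
--     tmpls = list()
--     is_payed = False
--
--     for r in zip(df, df2):
--         pay, percent = r[0], r[1]
--
--         predicate_1 = percent == '88%'
--         predicate_2 = is_payed == False
--         predicate_3 = pay != NONE_SIGN
--
--         if predicate_1 and predicate_2 and predicate_3:
--             tmpls.append(pay + fn)
--             is_payed = True
--
--         else:
--             tmpls.append(pay)
--     return tmpls
-- ===== SOURCE B (Python) =====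
-- NONE_SIGN = '✖️'
--
-- def epic_give_away(df, df2, fn):
--     rows = list(zip(df, df2))
--     idx = next((i for i, (pay, percent) in enumerate(rows)
--                 if percent == '88%' and pay != NONE_SIGN), None)
--     result = [pay for pay, _ in rows]
--     if idx is not None:
--         result[idx] = result[idx] + fn
--     return result
-- ===== Notes on version B (the rewrite author's own statement) =====
-- stated objective: alternative
-- what changed: Replaces A's single flag-tracking accumulation pass with a 'find the index of the first qualifying row, build the plain pay list, then patch that one slot' decomposition.
import Mathlib
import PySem

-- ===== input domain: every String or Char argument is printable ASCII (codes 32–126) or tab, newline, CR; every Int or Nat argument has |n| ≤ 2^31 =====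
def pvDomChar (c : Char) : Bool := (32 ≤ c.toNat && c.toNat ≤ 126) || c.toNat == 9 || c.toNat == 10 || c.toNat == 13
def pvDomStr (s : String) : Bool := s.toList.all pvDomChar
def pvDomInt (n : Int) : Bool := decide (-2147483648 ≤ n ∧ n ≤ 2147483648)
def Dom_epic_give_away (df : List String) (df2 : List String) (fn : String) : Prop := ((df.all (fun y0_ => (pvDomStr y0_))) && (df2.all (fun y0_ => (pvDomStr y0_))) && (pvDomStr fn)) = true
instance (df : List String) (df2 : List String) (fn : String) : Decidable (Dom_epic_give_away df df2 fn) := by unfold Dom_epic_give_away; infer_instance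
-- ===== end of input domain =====

-- B rebuilds the output by "find first qualifying index, map, patch one slot" instead of A's flag-tracking pass; same cost, different decomposition.
-- ===== PORT A =====
def pvNONE_SIGN : String := "\u2716\uFE0F"

-- loop body of A's for-loop, one step of the fold
def epicStep (fn : String) (st : List String × Bool) (r : String × String) : List String × Bool :=
  let pay := r.1
  let percent := r.2
  let predicate_1 := percent == "88%"
  let predicate_2 := st.2 == false
  let predicate_3 := pay != pvNONE_SIGN
  if predicate_1 && predicate_2 && predicate_3 then
    (st.1 ++ [pay ++ fn], true)
  else
    (st.1 ++ [pay], st.2)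

def epic_give_away (df : List String) (df2 : List String) (fn : String) : List String :=
  ((df.zip df2).foldl (epicStep fn) ([], false)).1

-- ===== PORT B =====
def epic_give_away_alt (df : List String) (df2 : List String) (fn : String) : List String :=
  let rows := df.zip df2
  let idx := rows.findIdx? (fun r => r.2 == "88%" && r.1 != pvNONE_SIGN)
  let result := rows.map Prod.fst
  match idx with
  | none => result
  | some i => result.set i (result.getD i "" ++ fn)

-- ===== PRECONDITION & SPEC =====
def Spec_epic_give_away (df : List String) (df2 : List String) (fn : String) (out : List String) : Prop := out = epic_give_away_alt df df2 fn
instance (df : List String) (df2 : List String) (fn : String) (out : List String) : Decidable (Spec_epic_give_away df df2 fn out) := by unfold Spec_epic_give_away; infer_instance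

-- ===== CLAIM (what is proved, stated in full; the proofs are below) =====
def Claim_equal_epic_give_away : Prop := ∀ (df : List String) (df2 : List String) (fn : String), Dom_epic_give_away df df2 fn → Spec_epic_give_away df df2 fn (epic_give_away df df2 fn)

-- ===== LEMMAS AND PROOFS =====

lemma epicStep_true (fn : String) (acc : List String) (r : String × String) :
    epicStep fn (acc, true) r = (acc ++ [r.1], true) := by
  simp [epicStep]

lemma epicStep_false_pos (fn : String) (acc : List String) (r : String × String)
    (h : (r.2 == "88%" && r.1 != pvNONE_SIGN) = true) :
    epicStep fn (acc, false) r = (acc ++ [r.1 ++ fn], true) := by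
  simp [epicStep]; simp at h; tauto

lemma epicStep_false_neg (fn : String) (acc : List String) (r : String × String)
    (h : ¬ (r.2 == "88%" && r.1 != pvNONE_SIGN) = true) :
    epicStep fn (acc, false) r = (acc ++ [r.1], false) := by
  simp [epicStep]; simp at h; tauto

lemma epic_foldl_true (fn : String) (l : List (String × String)) (acc : List String) :
    (l.foldl (epicStep fn) (acc, true)).1 = acc ++ l.map Prod.fst := by
  induction l generalizing acc with
  | nil => simp
  | cons r tl ih => rw [List.foldl_cons, epicStep_true, ih]; simp

lemma epic_foldl_false (fn : String) (l : List (String × String)) (acc : List String) :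
    (l.foldl (epicStep fn) (acc, false)).1
    = acc ++ (match l.findIdx? (fun r => r.2 == "88%" && r.1 != pvNONE_SIGN) with
      | none => l.map Prod.fst
      | some i => (l.map Prod.fst).set i ((l.map Prod.fst).getD i "" ++ fn)) := by
  induction l generalizing acc with
  | nil => simp
  | cons r tl ih =>
    by_cases h : (r.2 == "88%" && r.1 != pvNONE_SIGN) = true
    · rw [List.foldl_cons, epicStep_false_pos fn acc r h, epic_foldl_true,
        List.findIdx?_cons, if_pos h]
      simp [List.getD]
    · rw [List.foldl_cons, epicStep_false_neg fn acc r h, ih,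
        List.findIdx?_cons, if_neg h]
      cases hf : tl.findIdx? (fun r => r.2 == "88%" && r.1 != pvNONE_SIGN) with
      | none => simp
      | some i => simp [List.getD]

-- ===== VERDICT (by name: the statement is the Claim_ definition above) =====
theorem epic_give_away_spec : Claim_equal_epic_give_away := by
  intro df df2 fn _
  unfold Spec_epic_give_away epic_give_away epic_give_away_alt
  rw [epic_foldl_false]
  simp
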